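-- pv_equiv track=rewrite | github.com/Guilehm/numbers-to-text | functions.py | split_in_three
-- ===== SOURCE A (Python) =====
-- def split_in_three(number):
--     number_str = str(number)
--     numbers = []
--     while True:
--         numbers.insert(0, number_str[-3:])
--         number_str = number_str[:-3]
--         if not number_str:
--             break
--     for weight, number in enumerate(reversed(numbers)):
--         yield (number, weight)
-- ===== SOURCE B (Python) =====
-- def split_in_three(number):
--     s = str(number)
--     i = len(s)
--     weight = 0
--     while i > 0:
--         start = max(0, i - 3)
--         yield (s[start:i], weight)
--         i = start
--         weight += 1
-- ===== Notes on version B (the rewrite author's own statement) =====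
-- stated objective: simpler
-- what changed: B drops A's insert(0)-built list and the reversed/enumerate pass, walking the digit string right-to-left once with an index and a weight counter and yielding each three-character slice directly.
import Mathlib
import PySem

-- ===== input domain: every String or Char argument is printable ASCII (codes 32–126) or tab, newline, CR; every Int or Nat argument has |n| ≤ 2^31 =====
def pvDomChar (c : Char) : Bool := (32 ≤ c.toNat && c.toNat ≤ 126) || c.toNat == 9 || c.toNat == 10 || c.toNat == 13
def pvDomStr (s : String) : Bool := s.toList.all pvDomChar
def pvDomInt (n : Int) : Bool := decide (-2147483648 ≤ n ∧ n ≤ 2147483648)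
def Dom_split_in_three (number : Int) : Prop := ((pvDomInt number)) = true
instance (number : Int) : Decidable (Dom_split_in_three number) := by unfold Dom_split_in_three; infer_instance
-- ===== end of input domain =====

-- B replaces A's insert(0)-built chunk list plus reversed/enumerate pass by a single
-- right-to-left walk with an index and a weight counter (objective: simpler).

-- ===== PORT A =====
-- the 'while True' loop: insert number_str[-3:] at the front, cut the last 3 chars, stop when empty
def pvLoopA (s : List Char) (acc : List (List Char)) : List (List Char) :=
  if (PySem.List.slice s none (some (-3))).isEmpty then
    PySem.List.slice s (some (-3)) none :: acc
  else
    pvLoopA (PySem.List.slice s none (some (-3)))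
      (PySem.List.slice s (some (-3)) none :: acc)
termination_by s.length
decreasing_by
  rename_i h
  simp only [List.isEmpty_iff, PySem.List.slice_to_neg_ofNat s 3 (by omega)] at h ⊢
  have := List.length_pos_of_ne_nil h
  simp only [List.length_take] at this ⊢
  omega

def split_in_three (number : Int) : List (String × Int) :=
  let numbers := pvLoopA (PySem.Int.toChars number) []
  (PySem.List.enumerate numbers.reverse 0).map (fun p => (String.ofList p.2, p.1))

-- ===== PORT B =====
-- the 'while i > 0' loop: yield (s[start:i], weight) and step left
def pvLoopB (s : List Char) (i : Nat) (w : Int) : List (String × Int) :=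
  if 0 < i then
    let start := i - 3
    (String.ofList (PySem.List.slice s (some (start : Int)) (some (i : Int))), w)
      :: pvLoopB s start (w + 1)
  else []
termination_by i
decreasing_by omega

def split_in_three_alt (number : Int) : List (String × Int) :=
  let s := PySem.Int.toChars number
  pvLoopB s s.length 0

-- ===== PRECONDITION & SPEC =====
def Spec_split_in_three (number : Int) (out : List (String × Int)) : Prop := out = split_in_three_alt number
instance (number : Int) (out : List (String × Int)) : Decidable (Spec_split_in_three number out) := by unfold Spec_split_in_three; infer_instance

-- ===== CLAIM (what is proved, stated in full; the proofs are below) =====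
def Claim_equal_split_in_three : Prop := ∀ (number : Int), Dom_split_in_three number → Spec_split_in_three number (split_in_three number)

-- ===== LEMMAS AND PROOFS =====

-- accumulator lemma for A's loop
theorem pvLoopA_acc : ∀ (n : Nat) (s : List Char), s.length ≤ n → ∀ acc,
    pvLoopA s acc = pvLoopA s [] ++ acc := by
  intro n
  induction n with
  | zero =>
    intro s hs acc
    have hnil : s = [] := List.eq_nil_of_length_eq_zero (by omega)
    subst hnil
    have he : (PySem.List.slice ([] : List Char) none (some (-3))).isEmpty = true := by
      rw [PySem.List.slice_to_neg_ofNat ([] : List Char) 3 (by omega)]; simp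
    rw [pvLoopA, if_pos he, pvLoopA, if_pos he]
    simp
  | succ n ih =>
    intro s hs acc
    rw [pvLoopA]
    conv_rhs => rw [pvLoopA]
    by_cases h : (PySem.List.slice s none (some (-3))).isEmpty
    · simp [h]
    · simp only [h]
      have hlen : (PySem.List.slice s none (some (-3))).length ≤ n := by
        rw [PySem.List.slice_to_neg_ofNat s 3 (by omega)] at h ⊢
        simp only [List.isEmpty_iff] at h
        have h0 := List.length_pos_of_ne_nil h
        simp only [List.length_take] at h0 ⊢
        omega
      rw [ih _ hlen, ih _ hlen [PySem.List.slice s (some (-3)) none]]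
      simp

-- B's loop only reads s[0:i], so a longer suffix of s is irrelevant
theorem pvLoopB_take : ∀ (i : Nat) (s : List Char) (k : Nat) (w : Int), i ≤ k →
    pvLoopB (s.take k) i w = pvLoopB s i w := by
  intro i
  induction i using Nat.strong_induction_on with
  | _ i ih =>
    intro s k w hik
    rw [pvLoopB]
    conv_rhs => rw [pvLoopB]
    by_cases h : 0 < i
    · simp only [h, if_true]
      rw [ih (i - 3) (by omega) s k (w + 1) (by omega)]
      rw [PySem.List.slice_natCast, PySem.List.slice_natCast, List.drop_take,
        List.take_take]
      have hm : min (i - (i - 3)) (k - (i - 3)) = i - (i - 3) := by omega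
      rw [hm]
    · simp [h]

-- pvLoopB terminates immediately at index 0
theorem pvLoopB_zero (s : List Char) (w : Int) : pvLoopB s 0 w = [] := by
  rw [pvLoopB]; simp

-- main correspondence
theorem pvMain : ∀ (n : Nat) (s : List Char), s.length ≤ n → s ≠ [] → ∀ (w : Int),
    (PySem.List.enumerate (pvLoopA s []).reverse w).map (fun p => (String.ofList p.2, p.1))
      = pvLoopB s s.length w := by
  intro n
  induction n with
  | zero =>
    intro s hs hne
    exact absurd (List.eq_nil_of_length_eq_zero (by omega)) hne
  | succ n ih =>
    intro s hs hne w
    have hlen : 0 < s.length := List.length_pos_of_ne_nil hne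
    rw [pvLoopA]
    conv_rhs => rw [pvLoopB]
    rw [if_pos hlen]
    by_cases h : (PySem.List.slice s none (some (-3))).isEmpty
    · -- short string: one chunk
      have h3 : s.length ≤ 3 := by
        rw [PySem.List.slice_to_neg_ofNat s 3 (by omega)] at h
        simp only [List.isEmpty_iff, List.take_eq_nil_iff] at h
        rcases h with h | h
        · omega
        · exact absurd h hne
      have h0 : s.length - 3 = 0 := by omega
      simp only [if_pos h, h0]
      rw [PySem.List.slice_from_neg_ofNat s 3 (by omega), h0, List.drop_zero,
        pvLoopB_zero]
      simp [PySem.List.enumerate_cons, PySem.List.enumerate_nil]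
    · -- long string: chunks of the prefix, then the last 3 chars with weight w
      have h4 : 3 < s.length := by
        rw [PySem.List.slice_to_neg_ofNat s 3 (by omega)] at h
        simp only [List.isEmpty_iff, List.take_eq_nil_iff] at h
        omega
      simp only [if_neg h]
      rw [pvLoopA_acc (PySem.List.slice s none (some (-3))).length _ le_rfl]
      rw [PySem.List.slice_to_neg_ofNat s 3 (by omega),
        PySem.List.slice_from_neg_ofNat s 3 (by omega)]
      have ht : (s.take (s.length - 3)).length = s.length - 3 := by
        simp only [List.length_take]; omega
      have htne : s.take (s.length - 3) ≠ [] := by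
        simp only [ne_eq, List.take_eq_nil_iff, not_or]
        exact ⟨by omega, hne⟩
      rw [List.reverse_append, List.reverse_singleton, List.singleton_append,
        PySem.List.enumerate_cons, List.map_cons]
      have hb : s.length - 3 ≤ n := by omega
      rw [ih (s.take (s.length - 3)) (by rw [ht]; exact hb) htne (w + 1), ht,
        pvLoopB_take (s.length - 3) s (s.length - 3) (w + 1) le_rfl]
      have hd : s.length - (s.length - 3) = 3 := by omega
      have hdl : (s.drop (s.length - 3)).length ≤ 3 := by
        simp only [List.length_drop]; omega
      simp only [PySem.List.slice_natCast, hd, List.take_of_length_le hdl]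

theorem pvToChars_ne_nil (n : Int) : PySem.Int.toChars n ≠ [] := by
  unfold PySem.Int.toChars
  split
  · simp
  · exact List.ne_nil_of_length_pos Nat.length_toDigits_pos

-- ===== VERDICT (by name: the statement is the Claim_ definition above) =====
theorem split_in_three_spec : Claim_equal_split_in_three := by
  intro number _
  unfold Spec_split_in_three split_in_three split_in_three_alt
  exact pvMain _ _ le_rfl (pvToChars_ne_nil number) 0
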